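-- pv_equiv track=rewrite | github.com/AdamZhouSE/pythonHomework | Code/CodeRecords/2613/60719/249678.py | connell
-- ===== SOURCE A (Python) =====
-- def connell(num):
--     n = 0
--     i = 1
--     current = 1
--     total = ""
--     while n < num:
--         if num-n < i:
--             for j in range(num-n):
--                 total = total+str(current)
--                 if j != num-n-1:
--                     total = total+" "
--                 current = current+2
--             current = current-1
--         else:
--             for j in range(i):
--                 total = total+str(current)
--                 if j+1+n != num:
--                     total = total+" "
--                 current = current+2
--             current = current-1
--         n = n+i
--         i = i+1
--     return total
-- ===== SOURCE B (Python) =====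
-- def connell(num):
--     # Connell sequence via per-index closed form: the k-th term is 2*k - r,
--     # where r is the rounded square root of 2*k, maintained incrementally.
--     r = 1
--     terms = []
--     for k in range(1, num + 1):
--         if 2 * k > r * r + r:
--             r += 1
--         terms.append(str(2 * k - r))
--     return " ".join(terms)
-- ===== Notes on version B (the rewrite author's own statement) =====
-- stated objective: simpler
-- what changed: Replaces the group-by-group nested loops with manual separator bookkeeping by a single flat loop computing each Connell term from its index (2*k minus the rounded square root of 2*k, tracked incrementally) and a final ' '.join.
import Mathlib
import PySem

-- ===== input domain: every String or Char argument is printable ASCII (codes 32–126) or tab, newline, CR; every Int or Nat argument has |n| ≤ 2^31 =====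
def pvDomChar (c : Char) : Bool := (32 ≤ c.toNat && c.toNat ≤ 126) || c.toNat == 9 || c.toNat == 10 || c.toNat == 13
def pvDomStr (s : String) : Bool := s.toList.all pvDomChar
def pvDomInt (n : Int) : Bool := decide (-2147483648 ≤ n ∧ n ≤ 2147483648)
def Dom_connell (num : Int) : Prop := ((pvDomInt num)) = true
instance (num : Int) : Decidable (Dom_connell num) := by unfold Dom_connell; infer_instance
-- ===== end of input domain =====

-- B replaces A's group-by-group nested loops (with manual separator logic) by a single flat
-- loop computing each Connell term from its index and a final join: a simpler decomposition.

-- ===== PORT A =====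
-- while loop ported with fuel num.toNat + 1 (never exhausted: each iteration raises n by i ≥ 1
-- and the loop stops once n ≥ num; see loopA below).
def connellLoop : Nat → Int → Int → Int → Int → String → String
  | 0, _, _, _, _, total => total
  | fuel+1, num, n, i, current, total =>
    if n < num then
      if num - n < i then
        let st := (PySem.List.pyRange 0 (num - n) 1).foldl
          (fun (st : String × Int) j =>
            (st.1 ++ PySem.Int.toStr st.2 ++ (if j ≠ num - n - 1 then " " else ""), st.2 + 2))
          (total, current)
        connellLoop fuel num (n + i) (i + 1) (st.2 - 1) st.1
      else
        let st := (PySem.List.pyRange 0 i 1).foldl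
          (fun (st : String × Int) j =>
            (st.1 ++ PySem.Int.toStr st.2 ++ (if j + 1 + n ≠ num then " " else ""), st.2 + 2))
          (total, current)
        connellLoop fuel num (n + i) (i + 1) (st.2 - 1) st.1
    else total

def connell (num : Int) : String := connellLoop (num.toNat + 1) num 0 1 1 ""

-- ===== PORT B =====
def connell_alt (num : Int) : String :=
  PySem.Str.join " "
    ((PySem.List.pyRange 1 (num + 1) 1).foldl
      (fun (st : Int × List String) k =>
        let r := if 2 * k > st.1 * st.1 + st.1 then st.1 + 1 else st.1
        (r, st.2 ++ [PySem.Int.toStr (2 * k - r)]))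
      (1, [])).2

-- ===== PRECONDITION & SPEC =====
def Spec_connell (num : Int) (out : String) : Prop := out = connell_alt num
instance (num : Int) (out : String) : Decidable (Spec_connell num out) := by unfold Spec_connell; infer_instance

-- ===== CLAIM (what is proved, stated in full; the proofs are below) =====
def Claim_equal_connell : Prop := ∀ (num : Int), Dom_connell num → Spec_connell num (connell num)

-- ===== LEMMAS AND PROOFS =====

-- group index of the k-th Connell term (= rounded square root of 2*k); proof-only helper
def grp (k : Int) : Int :=
  if 2 * k > ((2 * k).toNat.sqrt : Int) * ((2 * k).toNat.sqrt : Int) + ((2 * k).toNat.sqrt : Int)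
  then ((2 * k).toNat.sqrt : Int) + 1 else ((2 * k).toNat.sqrt : Int)

-- the k-th term, as characters
def tch (k : Int) : List Char := PySem.Int.toChars (2 * k - grp k)

-- piece of the final string contributed by term k (with its separator)
def piece (num k : Int) : List Char :=
  tch k ++ if k = num then [] else [' ']

-- characterization: grp k = i for k in the i-th group
lemma grp_eq (i k : Int) (hi : 1 ≤ i) (hlo : i * i - i < 2 * k) (hhi : 2 * k ≤ i * i + i) :
    grp k = i := by
  have hm0 : (0:Int) ≤ 2 * k := by nlinarith
  have hk2 : ((2 * k).toNat : Int) = 2 * k := Int.toNat_of_nonneg hm0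
  set r : Int := ((2 * k).toNat.sqrt : Int) with hr
  have hr0 : (0:Int) ≤ r := by positivity
  have hrle : r * r ≤ 2 * k := by
    have h1 := Nat.sqrt_le' (2 * k).toNat
    zify at h1
    rw [hk2] at h1
    nlinarith [h1]
  have hrlt : 2 * k < (r + 1) * (r + 1) := by
    have h2 := Nat.lt_succ_sqrt' (2 * k).toNat
    zify at h2
    rw [hk2] at h2
    nlinarith [h2]
  unfold grp
  rw [← hr]
  split_ifs with h
  · by_contra hne
    rcases (by omega : r + 1 < i ∨ i < r + 1) with hlt | hgt
    · nlinarith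
    · nlinarith
  · rw [not_lt] at h
    by_contra hne
    rcases (by omega : r < i ∨ i < r) with hlt | hgt
    · nlinarith
    · nlinarith

-- B's fold produces exactly the term strings
lemma altLoop (num : Int) : ∀ (c : Nat) (k r : Int) (acc : List String),
    (num + 1 - k).toNat = c → 1 ≤ r →
    r * r - r ≤ 2 * (k - 1) → 2 * (k - 1) ≤ r * r + r →
    ((PySem.List.pyRange k (num + 1) 1).foldl
      (fun (st : Int × List String) k =>
        let r := if 2 * k > st.1 * st.1 + st.1 then st.1 + 1 else st.1
        (r, st.2 ++ [PySem.Int.toStr (2 * k - r)])) (r, acc)).2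
    = acc ++ (PySem.List.pyRange k (num + 1) 1).map (fun j => PySem.Int.toStr (2 * j - grp j)) := by
  intro c
  induction c with
  | zero =>
    intro k r acc hc hr _ _
    rw [PySem.List.pyRange_one_eq_nil (by omega)]
    simp
  | succ c ih =>
    intro k r acc hc hr hlo hhi
    by_cases h : k < num + 1
    · rw [PySem.List.pyRange_one_cons h]
      simp only [List.foldl_cons, List.map_cons]
      set r' : Int := if 2 * k > r * r + r then r + 1 else r with hr'
      have hr'1 : 1 ≤ r' := by rw [hr']; split_ifs <;> omega
      have hbnd : r' * r' - r' < 2 * k ∧ 2 * k ≤ r' * r' + r' := by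
        rw [hr']
        split_ifs with hcnd
        · constructor <;> nlinarith
        · rw [not_lt] at hcnd
          constructor <;> nlinarith
      have hg : grp k = r' := grp_eq r' k hr'1 hbnd.1 hbnd.2
      have hrec := ih (k + 1) r' (acc ++ [PySem.Int.toStr (2 * k - r')]) (by omega) hr'1
        (by have := hbnd.1; omega) (by have := hbnd.2; omega)
      rw [hrec, hg, List.append_assoc]
      simp
    · rw [PySem.List.pyRange_one_eq_nil (by omega)]
      simp

-- A's inner for-loop (canonical body): state after folding pyRange a L 1
lemma innerA (num n L : Int) : ∀ (c : Nat) (a cur : Int) (total : String),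
    (L - a).toNat = c → a ≤ L →
    (((PySem.List.pyRange a L 1).foldl
      (fun (st : String × Int) j =>
        (st.1 ++ PySem.Int.toStr st.2 ++ (if j + 1 + n ≠ num then " " else ""), st.2 + 2))
      (total, cur)).1.toList
      = total.toList ++
        ((PySem.List.pyRange a L 1).map
          (fun j => PySem.Int.toChars (cur + 2 * (j - a)) ++ if j + 1 + n = num then [] else [' '])).flatten)
    ∧ ((PySem.List.pyRange a L 1).foldl
      (fun (st : String × Int) j =>
        (st.1 ++ PySem.Int.toStr st.2 ++ (if j + 1 + n ≠ num then " " else ""), st.2 + 2))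
      (total, cur)).2 = cur + 2 * (L - a) := by
  intro c
  induction c with
  | zero =>
    intro a cur total hc ha
    rw [PySem.List.pyRange_one_eq_nil (by omega)]
    refine ⟨by simp, ?_⟩
    simp only [List.foldl_nil]
    omega
  | succ c ih =>
    intro a cur total hc ha
    by_cases h : a < L
    · rw [PySem.List.pyRange_one_cons h]
      simp only [List.foldl_cons, List.map_cons, List.flatten_cons]
      have step1 : (total ++ PySem.Int.toStr cur ++ (if a + 1 + n ≠ num then " " else "")).toList
          = total.toList ++ (PySem.Int.toChars (cur + 2 * (a - a)) ++ if a + 1 + n = num then [] else [' ']) := by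
        have e : cur + 2 * (a - a) = cur := by ring
        rw [e]
        split_ifs <;> simp_all [PySem.Int.toList_toStr]
      obtain ⟨ih1, ih2⟩ := ih (a + 1) (cur + 2)
        (total ++ PySem.Int.toStr cur ++ (if a + 1 + n ≠ num then " " else "")) (by omega) (by omega)
      constructor
      · rw [ih1, step1, List.append_assoc]
        congr 2
        refine congrArg List.flatten (List.map_congr_left fun j hj => ?_)
        have e : cur + 2 + 2 * (j - (a + 1)) = cur + 2 * (j - a) := by ring
        rw [e]
      · rw [ih2]; ring
    · omega

-- the two syntactic inner bodies agree (A's last-group branch writes the condition differently)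
lemma body_congr (num n : Int) :
    (fun (st : String × Int) j =>
      (st.1 ++ PySem.Int.toStr st.2 ++ (if j ≠ num - n - 1 then " " else ""), st.2 + 2))
    = (fun (st : String × Int) j =>
      (st.1 ++ PySem.Int.toStr st.2 ++ (if j + 1 + n ≠ num then " " else ""), st.2 + 2)) := by
  funext st j
  have h : (j ≠ num - n - 1) ↔ (j + 1 + n ≠ num) := by omega
  simp only [h]

-- once n ≥ num the loop returns total for any fuel
lemma loopA_exit (fuel : Nat) (num n i cur : Int) (total : String) (h : num ≤ n) :
    connellLoop fuel num n i cur total = total := by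
  cases fuel with
  | zero => rfl
  | succ fuel => simp only [connellLoop]; rw [if_neg (by omega)]

-- A's loop appends exactly the pieces of the remaining terms
lemma loopA (num : Int) : ∀ (fuel : Nat) (n i cur : Int) (total : String),
    1 ≤ i → 0 ≤ n → 2 * n = i * i - i → cur = 2 * (n + 1) - i → (num - n).toNat ≤ fuel →
    (connellLoop fuel num n i cur total).toList
    = total.toList ++ ((PySem.List.pyRange (n + 1) (num + 1) 1).map (piece num)).flatten := by
  intro fuel
  induction fuel with
  | zero =>
    intro n i cur total hi hn hinv hcur hfuel
    rw [PySem.List.pyRange_one_eq_nil (by omega)]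
    simp [connellLoop]
  | succ fuel ih =>
    intro n i cur total hi hn hinv hcur hfuel
    by_cases hlt : n < num
    · simp only [connellLoop]
      rw [if_pos hlt]
      by_cases hbr : num - n < i
      · -- truncated last group
        rw [if_pos hbr]
        rw [body_congr num n]
        obtain ⟨h1, _⟩ := innerA num n (num - n) (num - n).toNat 0 cur total (by omega) (by omega)
        rw [loopA_exit _ _ _ _ _ _ (by omega), h1]
        congr 1
        have hre : PySem.List.pyRange 0 (num - n) 1
            = (PySem.List.pyRange (n+1) (num+1) 1).map (fun k => k - (n+1)) := by
          rw [PySem.List.pyRange_one, PySem.List.pyRange_one, List.map_map]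
          have hlen : (num - n - 0).toNat = (num + 1 - (n+1)).toNat := by omega
          rw [hlen]
          apply List.map_congr_left
          intro x hx
          simp only [Function.comp]
          omega
        rw [hre, List.map_map]
        congr 1
        apply List.map_congr_left
        intro k hk
        have hkb := (PySem.List.mem_pyRange_one).mp hk
        simp only [Function.comp, piece, tch]
        have hg : grp k = i := grp_eq i k hi (by linarith [hkb.1]) (by linarith [hkb.2])
        rw [hg]
        have e1 : cur + 2 * (k - (n + 1) - 0) = 2 * k - i := by omega
        rw [e1]
        congr 1
        have h2 : (k - (n+1) + 1 + n = num) ↔ (k = num) := by omega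
        simp only [h2]
      · -- full group
        rw [if_neg hbr]
        obtain ⟨h1, h2⟩ := innerA num n i i.toNat 0 cur total (by omega) (by omega)
        rw [ih (n + i) (i + 1) _ _ (by omega) (by omega)
            (by have e : (i+1)*(i+1) - (i+1) = i*i + i := by ring
                rw [e]; linarith [hinv])
            (by rw [h2]; omega) (by omega), h1]
        rw [List.append_assoc]
        congr 1
        have hsplit : PySem.List.pyRange (n+1) (num+1) 1
            = PySem.List.pyRange (n+1) (n+i+1) 1 ++ PySem.List.pyRange (n+i+1) (num+1) 1 :=
          PySem.List.pyRange_one_append _ _ _ (by omega) (by omega)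
        rw [hsplit, List.map_append, List.flatten_append]
        congr 1
        have hre : PySem.List.pyRange 0 i 1
            = (PySem.List.pyRange (n+1) (n+i+1) 1).map (fun k => k - (n+1)) := by
          rw [PySem.List.pyRange_one, PySem.List.pyRange_one, List.map_map]
          have hlen : (i - 0).toNat = (n + i + 1 - (n+1)).toNat := by omega
          rw [hlen]
          apply List.map_congr_left
          intro x hx
          simp only [Function.comp]
          omega
        rw [hre, List.map_map]
        congr 1
        apply List.map_congr_left
        intro k hk
        have hkb := (PySem.List.mem_pyRange_one).mp hk
        simp only [Function.comp, piece, tch]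
        have hg : grp k = i := grp_eq i k hi (by linarith [hkb.1]) (by linarith [hkb.2])
        rw [hg]
        have e1 : cur + 2 * (k - (n + 1) - 0) = 2 * k - i := by omega
        rw [e1]
        congr 1
        have h2' : (k - (n+1) + 1 + n = num) ↔ (k = num) := by omega
        simp only [h2']
    · simp only [connellLoop]
      rw [if_neg hlt, PySem.List.pyRange_one_eq_nil (by omega)]
      simp
  -- note: the `fuel = 0` base case only needs num ≤ n, guaranteed by hfuel

-- joining with " " equals flattening the pieces (which carry their own separators)
lemma join_eq_flatten (num : Int) : ∀ (c : Nat) (a : Int), (num + 1 - a).toNat = c →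
    PySem.Chars.join [' '] ((PySem.List.pyRange a (num + 1) 1).map tch)
    = ((PySem.List.pyRange a (num + 1) 1).map (piece num)).flatten := by
  intro c
  induction c with
  | zero =>
    intro a hc
    rw [PySem.List.pyRange_one_eq_nil (by omega)]
    simp [PySem.Chars.join_nil]
  | succ c ih =>
    intro a hc
    by_cases h : a < num + 1
    · rw [PySem.List.pyRange_one_cons h]
      by_cases hlast : a + 1 < num + 1
      · have hcons : PySem.List.pyRange (a+1) (num+1) 1
            = (a+1) :: PySem.List.pyRange (a+2) (num+1) 1 := by
            have e : a + 1 + 1 = a + 2 := by ring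
            rw [PySem.List.pyRange_one_cons hlast, e]
        simp only [List.map_cons, List.flatten_cons, hcons]
        rw [PySem.Chars.join_cons_cons]
        have hih := ih (a + 1) (by omega)
        rw [hcons] at hih
        simp only [List.map_cons] at hih
        rw [hih]
        simp only [List.flatten_cons, piece]
        have hne : ¬ (a = num) := by omega
        rw [if_neg hne]
      · have hnil : PySem.List.pyRange (a+1) (num+1) 1 = [] :=
          PySem.List.pyRange_one_eq_nil (by omega)
        rw [hnil]
        simp only [List.map_nil, List.map_cons, List.flatten_cons, List.flatten_nil]
        rw [PySem.Chars.join_singleton]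
        simp only [piece]
        have heq : a = num := by omega
        rw [if_pos heq]
        simp
    · rw [PySem.List.pyRange_one_eq_nil (by omega)]
      simp [PySem.Chars.join_nil]

-- ===== VERDICT (by name: the statement is the Claim_ definition above) =====
theorem connell_spec : Claim_equal_connell := by
  intro num _
  unfold Spec_connell
  suffices h : (connell num).toList = (connell_alt num).toList by
    have := congrArg String.ofList h
    simpa using this
  have hA : (connell num).toList
      = ((PySem.List.pyRange 1 (num + 1) 1).map (piece num)).flatten := by
    have := loopA num (num.toNat + 1) 0 1 1 "" (by omega) (by omega) (by norm_num)
      (by norm_num) (by omega)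
    simpa [connell] using this
  have hB : (connell_alt num).toList
      = PySem.Chars.join [' '] ((PySem.List.pyRange 1 (num + 1) 1).map tch) := by
    unfold connell_alt
    rw [altLoop num (num + 1 - 1).toNat 1 1 [] (by omega) (by omega) (by norm_num) (by norm_num)]
    rw [PySem.Str.toList_join]
    simp only [List.nil_append, List.map_map]
    congr 1
    apply List.map_congr_left
    intro k hk
    simp [Function.comp, PySem.Int.toList_toStr, tch]
  rw [hA, hB, join_eq_flatten num (num + 1 - 1).toNat 1 (by omega)]
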